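-- pv_equiv track=rewrite | github.com/cxhy/mem_gen | scripts/tb_gen.py | _generate_write_data
-- ===== SOURCE A (Python) =====
-- import math
--
-- def _fill_pattern(byte_val: int, width: int) -> int:
--     """Repeat byte_val across width bits."""
--     byte_count = math.ceil(width / 8)
--     raw = 0
--     for i in range(byte_count):
--         raw |= byte_val << (i * 8)
--     mask = (1 << width) - 1
--     return raw & mask
--
-- def _addr_based_pattern(addr: int, width: int) -> int:
--     """Build {addr, ~addr, addr, ~addr, ...} filling width bits."""
--     addr_w = max(addr.bit_length(), 1)
--     addr_mask = (1 << addr_w) - 1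
--     parts = [addr & addr_mask, (~addr) & addr_mask]
--     raw = 0
--     bit_pos = 0
--     idx = 0
--     while bit_pos < width:
--         chunk = parts[idx % 2]
--         raw |= chunk << bit_pos
--         bit_pos += addr_w
--         idx += 1
--     return raw & ((1 << width) - 1)
--
-- def _generate_write_data(width: int, num_vectors: int) -> list[int]:
--     """Generate write data vectors per §4.3 strategy."""
--     data: list[int] = []
--     all_ones = (1 << width) - 1
--     for i in range(num_vectors):
--         if i == 0:
--             data.append(_fill_pattern(0xA5, width))
--         elif i == 1:
--             data.append(_fill_pattern(0x5A, width))
--         elif i == 2: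
--             data.append(_fill_pattern(0xDE, width))
--         elif i == 3:
--             data.append(_fill_pattern(0xCA, width))
--         elif i == num_vectors - 2:
--             data.append(all_ones)
--         elif i == num_vectors - 1:
--             data.append(0)
--         else:
--             data.append(_addr_based_pattern(i, width))
--     return data
-- ===== SOURCE B (Python) =====
-- def _replicate(unit: int, period: int, width: int) -> int:
--     """Replicate a `period`-bit unit to cover `width` bits by shift-and-OR doubling."""
--     mask = (1 << width) - 1
--     r = unit
--     span = period
--     while span < width:
--         r |= r << span
--         span <<= 1
--     return r & mask
--
--
-- def _generate_write_data(width: int, num_vectors: int) -> list[int]: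
--     """Generate write data vectors per §4.3 strategy (doubling replication)."""
--     all_ones = (1 << width) - 1
--     head_bytes = (0xA5, 0x5A, 0xDE, 0xCA)
--     data: list[int] = []
--     for i in range(num_vectors):
--         if i < 4:
--             data.append(_replicate(head_bytes[i], 8, width))
--         elif i == num_vectors - 2:
--             data.append(all_ones)
--         elif i == num_vectors - 1:
--             data.append(0)
--         else:
--             w = max(i.bit_length(), 1)
--             m = (1 << w) - 1
--             unit = (i & m) | ((~i & m) << w)
--             data.append(_replicate(unit, 2 * w, width))
--     return data
-- ===== Notes on version B (the rewrite author's own statement) =====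
-- stated objective: faster
-- what changed: Each per-vector bit pattern is built by replicating one pattern period with shift-and-OR doubling (log-many big-int ops) instead of A's per-chunk linear OR accumulation across the whole width.
import Mathlib
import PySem

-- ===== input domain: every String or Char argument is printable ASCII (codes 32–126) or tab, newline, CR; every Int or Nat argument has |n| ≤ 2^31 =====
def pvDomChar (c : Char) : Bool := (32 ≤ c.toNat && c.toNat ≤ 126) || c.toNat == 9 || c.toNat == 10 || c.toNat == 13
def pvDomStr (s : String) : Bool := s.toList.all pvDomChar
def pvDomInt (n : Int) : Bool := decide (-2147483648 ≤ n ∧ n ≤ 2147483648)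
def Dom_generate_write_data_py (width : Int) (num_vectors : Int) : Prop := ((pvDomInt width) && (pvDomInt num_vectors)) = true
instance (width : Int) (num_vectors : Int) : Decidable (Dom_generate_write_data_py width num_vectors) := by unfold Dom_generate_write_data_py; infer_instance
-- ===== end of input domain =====

-- B replaces A's per-chunk linear pattern accumulation by shift-and-OR doubling of one
-- pattern period (objective: faster; measured asymptotically faster at large widths).
-- Bitwise loop state is kept in Nat in both ports: exact for the nonnegative values the
-- Python code manipulates on Pre_ (0 ≤ width; loop indices i are nonnegative).

-- ===== PORT A =====
-- raw |= byte_val << (i * 8) accumulated over range(byte_count)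
def pvFillRaw (byteVal : Nat) (byteCount : Nat) : Nat :=
  (List.range byteCount).foldl (fun raw i => raw ||| (byteVal <<< (i * 8))) 0

def pvFillPattern (byteVal : Int) (width : Int) : Int :=
  -- math.ceil(width / 8): exact as (width+7)//8 for 0 ≤ width ≤ 2^31 (float division is exact there)
  let byteCount : Nat := (PySem.Int.floordiv (width + 7) 8).toNat
  let raw := pvFillRaw byteVal.toNat byteCount
  ((raw &&& ((1 <<< width.toNat) - 1) : Nat) : Int)

-- while bit_pos < width: raw |= parts[idx % 2] << bit_pos; bit_pos += addr_w; idx += 1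
-- (the `0 < a` conjunct only makes the recursion total; Python's addr_w = max(bit_length,1) ≥ 1)
def pvAddrLoop (p0 p1 a width raw bit_pos idx : Nat) : Nat :=
  if h : 0 < a ∧ bit_pos < width then
    pvAddrLoop p0 p1 a width (raw ||| ((if idx % 2 = 0 then p0 else p1) <<< bit_pos)) (bit_pos + a) (idx + 1)
  else raw
termination_by width - bit_pos
decreasing_by omega

def pvAddrBasedPattern (addr : Int) (width : Int) : Int :=
  let a := max (PySem.Int.bitLength addr) 1
  let addr_mask : Nat := (1 <<< a) - 1
  let p0 := addr.toNat &&& addr_mask            -- addr & addr_mask  (addr ≥ 0 here)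
  let p1 := addr_mask ^^^ p0                    -- (~addr) & addr_mask = addr_mask XOR (addr & addr_mask) for addr ≥ 0
  let raw := pvAddrLoop p0 p1 a width.toNat 0 0 0
  ((raw &&& ((1 <<< width.toNat) - 1) : Nat) : Int)

def generate_write_data_py (width : Int) (num_vectors : Int) : List Int :=
  let all_ones : Int := (((1 <<< width.toNat) - 1 : Nat) : Int)
  (PySem.List.pyRange 0 num_vectors).foldl (fun data i =>
    data ++ [if i == 0 then pvFillPattern 0xA5 width
             else if i == 1 then pvFillPattern 0x5A width
             else if i == 2 then pvFillPattern 0xDE width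
             else if i == 3 then pvFillPattern 0xCA width
             else if i == num_vectors - 2 then all_ones
             else if i == num_vectors - 1 then 0
             else pvAddrBasedPattern i width]) []

-- ===== PORT B =====
-- while span < width: r |= r << span; span <<= 1   (0 < span totality guard; callers pass span ≥ 8 resp. ≥ 2)
def pvRepAux (u span width : Nat) : Nat :=
  if h : 0 < span ∧ span < width then pvRepAux (u ||| (u <<< span)) (2 * span) width else u
termination_by width - span
decreasing_by omega

def pvReplicate (unit period width : Nat) : Nat :=
  pvRepAux unit period width &&& ((1 <<< width) - 1)

def generate_write_data_py_alt (width : Int) (num_vectors : Int) : List Int :=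
  let w := width.toNat
  let all_ones : Int := (((1 <<< w) - 1 : Nat) : Int)
  let head_bytes : List Nat := [0xA5, 0x5A, 0xDE, 0xCA]
  (PySem.List.pyRange 0 num_vectors).foldl (fun data i =>
    data ++ [if i < 4 then ((pvReplicate (head_bytes.getD i.toNat 0) 8 w : Nat) : Int)  -- head_bytes[i]: in range since 0 ≤ i < 4
             else if i == num_vectors - 2 then all_ones
             else if i == num_vectors - 1 then 0
             else
               let a := max (PySem.Int.bitLength i) 1
               let m : Nat := (1 <<< a) - 1
               let unit := (i.toNat &&& m) ||| ((m ^^^ (i.toNat &&& m)) <<< a)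
               ((pvReplicate unit (2 * a) w : Nat) : Int)]) []

-- ===== PRECONDITION & SPEC =====
-- Pre_ excludes width < 0, on which Python A raises ValueError ("negative shift count") at (1 << width).
def Pre_generate_write_data_py (width : Int) (num_vectors : Int) : Prop := 0 ≤ width
instance (width : Int) (num_vectors : Int) : Decidable (Pre_generate_write_data_py width num_vectors) := by unfold Pre_generate_write_data_py; infer_instance
def pvWitness_generate_write_data_py : Int × Int := (12, 8)

def Spec_generate_write_data_py (width : Int) (num_vectors : Int) (out : List Int) : Prop := out = generate_write_data_py_alt width num_vectors
instance (width : Int) (num_vectors : Int) (out : List Int) : Decidable (Spec_generate_write_data_py width num_vectors out) := by unfold Spec_generate_write_data_py; infer_instance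

-- ===== CLAIM (what is proved, stated in full; the proofs are below) =====
def Claim_equal_generate_write_data_py : Prop := ∀ (width : Int) (num_vectors : Int), Dom_generate_write_data_py width num_vectors → Pre_generate_write_data_py width num_vectors → Spec_generate_write_data_py width num_vectors (generate_write_data_py width num_vectors)

-- ===== LEMMAS AND PROOFS =====

theorem pv_mask_testBit (x w j : Nat) :
    (x &&& ((1 <<< w) - 1)).testBit j = (x.testBit j && decide (j < w)) := by
  rw [Nat.one_shiftLeft, Nat.testBit_land, Nat.testBit_two_pow_sub_one]

theorem pvFillRaw_testBit (b : Nat) (hb : b < 2 ^ 8) (c : Nat) (j : Nat) :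
    (pvFillRaw b c).testBit j = (decide (j < 8 * c) && b.testBit (j % 8)) := by
  induction c with
  | zero => simp [pvFillRaw, Nat.zero_testBit]
  | succ n ih =>
    have : pvFillRaw b (n + 1) = pvFillRaw b n ||| (b <<< (n * 8)) := by
      simp [pvFillRaw, List.range_succ]
    rw [this, Nat.testBit_lor, ih, Nat.testBit_shiftLeft]
    by_cases h1 : j < 8 * n
    · have : ¬ (j ≥ n * 8) := by omega
      simp [h1, this]
      omega
    · by_cases h2 : j < 8 * (n + 1)
      · have hge : j ≥ n * 8 := by omega
        have hmod : j - n * 8 = j % 8 := by omega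
        simp [h1, h2, hge, hmod]
      · have hb' : b.testBit (j - n * 8) = false :=
          Nat.testBit_lt_two_pow (lt_of_lt_of_le hb (Nat.pow_le_pow_right (by norm_num) (by omega)))
        simp [h1, h2, hb']

theorem pvRepAux_testBit (p u0 : Nat) :
    ∀ (u span w : Nat), 0 < span → p ∣ span →
    (∀ j, u.testBit j = (decide (j < span) && u0.testBit (j % p))) →
    ∀ j, j < w → (pvRepAux u span w).testBit j = u0.testBit (j % p) := by
  intro u span w
  fun_induction pvRepAux u span w with
  | case1 u span h ih =>
    intro hspan hdvd hchar j hj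
    apply ih (by omega) (by exact Dvd.dvd.mul_left hdvd 2) _ j hj
    intro k
    obtain ⟨t, ht⟩ := hdvd
    rw [Nat.testBit_lor, Nat.testBit_shiftLeft, hchar k]
    by_cases h1 : k < span
    · have : ¬ (k ≥ span) := by omega
      simp [h1, this]
      omega
    · by_cases h2 : k < 2 * span
      · have hge : k ≥ span := by omega
        have hlt : k - span < span := by omega
        have key : (k - span) + t * p = k := by rw [Nat.mul_comm t p, ← ht]; omega
        have hmod : (k - span) % p = k % p := by
          conv_rhs => rw [← key]
          rw [Nat.add_mul_mod_self_right]
        simp [h1, h2, hge, hchar, hlt, hmod]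
      · have hge : k ≥ span := by omega
        have : ¬ (k - span < span) := by omega
        simp [h1, h2, hge, hchar, this]
  | case2 u span h =>
    intro hspan _ hchar j hj
    have : j < span := by omega
    simp [hchar, this]

theorem pvAddrLoop_testBit (p0 p1 a : Nat) (ha : 0 < a) (hp0 : p0 < 2 ^ a) (hp1 : p1 < 2 ^ a) :
    ∀ (w raw bit_pos idx : Nat), bit_pos = idx * a →
    (∀ j, raw.testBit j = (decide (j < bit_pos) && (p0 ||| (p1 <<< a)).testBit (j % (2 * a)))) →
    ∀ j, j < w → (pvAddrLoop p0 p1 a w raw bit_pos idx).testBit j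
      = (p0 ||| (p1 <<< a)).testBit (j % (2 * a)) := by
  intro w raw bit_pos idx
  fun_induction pvAddrLoop p0 p1 a w raw bit_pos idx with
  | case1 raw bit_pos idx h ih =>
    intro hbp hchar j hj
    apply ih (by rw [hbp]; ring) _ j hj
    intro k
    rw [Nat.testBit_lor, Nat.testBit_shiftLeft, hchar k]
    by_cases h1 : k < bit_pos
    · have : ¬ (k ≥ bit_pos) := by omega
      simp [h1, this]
      omega
    · by_cases h2 : k < bit_pos + a
      · have hge : k ≥ bit_pos := by omega
        have hr : k - bit_pos < a := by omega
        simp only [h1, decide_false, Bool.false_and, Bool.false_or, ge_iff_le, hge, decide_true,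
          Bool.true_and, show decide (k < bit_pos + a) = true by simp [h2]]
        -- chunk bit (k - bit_pos) equals unit bit (k % (2a))
        rcases Nat.even_or_odd idx with ⟨t, ht⟩ | ⟨t, ht⟩
        · have hidx : idx % 2 = 0 := by omega
          have hbp2 : bit_pos = t * (2 * a) := by rw [hbp, ht]; ring
          have hmod : k % (2 * a) = k - bit_pos := by
            conv_lhs => rw [show k = (k - bit_pos) + t * (2 * a) by omega]
            rw [Nat.add_mul_mod_self_right, Nat.mod_eq_of_lt (by omega)]
          rw [hmod, Nat.testBit_lor, Nat.testBit_shiftLeft]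
          have : ¬ (k - bit_pos ≥ a) := by omega
          simp [hidx, this]
        · have hidx : ¬ (idx % 2 = 0) := by omega
          have hbp2 : bit_pos = t * (2 * a) + a := by rw [hbp, ht]; ring
          have hmod : k % (2 * a) = a + (k - bit_pos) := by
            conv_lhs => rw [show k = (a + (k - bit_pos)) + t * (2 * a) by omega]
            rw [Nat.add_mul_mod_self_right, Nat.mod_eq_of_lt (by omega)]
          rw [hmod, Nat.testBit_lor, Nat.testBit_shiftLeft]
          have hp0' : p0.testBit (a + (k - bit_pos)) = false :=
            Nat.testBit_lt_two_pow (lt_of_lt_of_le hp0 (Nat.pow_le_pow_right (by norm_num) (by omega)))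
          have harg : a + (k - bit_pos) - a = k - bit_pos := by omega
          simp [hidx, hp0', harg]
      · have hge : k ≥ bit_pos := by omega
        have hchunk : ∀ c : Nat, c < 2 ^ a → c.testBit (k - bit_pos) = false := fun c hc =>
          Nat.testBit_lt_two_pow (lt_of_lt_of_le hc (Nat.pow_le_pow_right (by norm_num) (by omega)))
        simp only [h1, decide_false, Bool.false_and, Bool.false_or, ge_iff_le, hge, decide_true,
          Bool.true_and, show decide (k < bit_pos + a) = false by simp; omega]
        split <;> [exact hchunk p0 hp0; exact hchunk p1 hp1]
  | case2 raw bit_pos idx h =>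
    intro hbp hchar j hj
    have : j < bit_pos := by omega
    simp [hchar, this]

-- the four header patterns: A's byte fill equals B's doubling replication
theorem pv_fill_eq (b : Nat) (hb : b < 2 ^ 8) (width : Int) (hw : 0 ≤ width) :
    pvFillPattern (b : Int) width = ((pvReplicate b 8 width.toNat : Nat) : Int) := by
  obtain ⟨w, rfl⟩ := Int.eq_ofNat_of_zero_le hw
  have hcount : (PySem.Int.floordiv ((w : Int) + 7) 8).toNat = (w + 7) / 8 := by
    rw [PySem.Int.floordiv_eq_ediv_of_pos (by norm_num)]
    omega
  have hinit : ∀ j, b.testBit j = (decide (j < 8) && b.testBit (j % 8)) := by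
    intro j
    by_cases h : j < 8
    · simp [h, Nat.mod_eq_of_lt h]
    · have hbj : b < 2 ^ j := lt_of_lt_of_le hb (Nat.pow_le_pow_right (by norm_num) (by omega : 8 ≤ j))
      simp [h, Nat.testBit_lt_two_pow hbj]
  simp only [pvFillPattern, pvReplicate, hcount, Int.toNat_natCast]
  congr 1
  apply Nat.eq_of_testBit_eq
  intro j
  rw [pv_mask_testBit, pv_mask_testBit]
  by_cases hj : j < w
  · rw [pvFillRaw_testBit b hb _ j,
        pvRepAux_testBit 8 b b 8 w (by norm_num) dvd_rfl hinit j hj]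
    have : j < 8 * ((w + 7) / 8) := by omega
    simp [this, hj]
  · simp [hj]

-- the address-based pattern: A's per-chunk loop equals B's doubling replication of one period
theorem pv_addr_eq (i width : Int) :
    pvAddrBasedPattern i width =
      ((pvReplicate ((i.toNat &&& ((1 <<< max (PySem.Int.bitLength i) 1) - 1)) |||
          ((((1 <<< max (PySem.Int.bitLength i) 1) - 1) ^^^
            (i.toNat &&& ((1 <<< max (PySem.Int.bitLength i) 1) - 1))) <<< max (PySem.Int.bitLength i) 1))
        (2 * max (PySem.Int.bitLength i) 1) width.toNat : Nat) : Int) := by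
  set a := max (PySem.Int.bitLength i) 1 with ha
  have ha1 : 0 < a := by omega
  set m : Nat := (1 <<< a) - 1 with hm
  have hm2 : m = 2 ^ a - 1 := by rw [hm, Nat.one_shiftLeft]
  set p0 := i.toNat &&& m with hp0def
  set p1 := m ^^^ p0 with hp1def
  have hp0 : p0 < 2 ^ a := lt_of_le_of_lt Nat.and_le_right (by rw [hm2]; have := Nat.one_le_two_pow (n := a); omega)
  have hm' : m < 2 ^ a := by rw [hm2]; have := Nat.one_le_two_pow (n := a); omega
  have hp1 : p1 < 2 ^ a := Nat.xor_lt_two_pow hm' hp0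
  set u : Nat := p0 ||| (p1 <<< a) with hu
  have hu2a : u < 2 ^ (2 * a) := by
    rw [hu]
    apply Nat.or_lt_two_pow
    · exact lt_of_lt_of_le hp0 (Nat.pow_le_pow_right (by norm_num) (by omega))
    · rw [Nat.shiftLeft_eq]
      calc p1 * 2 ^ a < 2 ^ a * 2 ^ a := by
            exact Nat.mul_lt_mul_of_lt_of_le hp1 (le_refl _) (by positivity)
        _ = 2 ^ (2 * a) := by rw [← pow_add]; ring_nf
  have hinit : ∀ j, u.testBit j = (decide (j < 2 * a) && u.testBit (j % (2 * a))) := by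
    intro j
    by_cases h : j < 2 * a
    · simp [h, Nat.mod_eq_of_lt h]
    · have huj : u < 2 ^ j := lt_of_lt_of_le hu2a (Nat.pow_le_pow_right (by norm_num) (by omega : 2 * a ≤ j))
      simp [h, Nat.testBit_lt_two_pow huj]
  simp only [pvAddrBasedPattern, pvReplicate]
  congr 1
  apply Nat.eq_of_testBit_eq
  intro j
  rw [pv_mask_testBit, pv_mask_testBit]
  by_cases hj : j < width.toNat
  · rw [pvAddrLoop_testBit p0 p1 a ha1 hp0 hp1 width.toNat 0 0 0 (by omega)
          (by intro k; simp [Nat.zero_testBit]) j hj,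
        pvRepAux_testBit (2 * a) u u (2 * a) width.toNat (by omega) dvd_rfl hinit j hj]
  · simp [hj]

-- ===== VERDICT (by name: the statement is the Claim_ definition above) =====
theorem generate_write_data_py_spec : Claim_equal_generate_write_data_py := by
  intro width num_vectors _ hpre
  unfold Spec_generate_write_data_py
  unfold generate_write_data_py generate_write_data_py_alt
  simp only [PySem.List.foldl_append_singleton_eq_map, List.nil_append]
  apply List.map_congr_left
  intro i hi
  obtain ⟨hi0, hilt⟩ := PySem.List.mem_pyRange_one.mp hi
  by_cases h0 : i = 0
  · subst h0
    have h := pv_fill_eq 0xA5 (by norm_num) width hpre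
    simp only [pvReplicate] at h
    simpa using h
  by_cases h1 : i = 1
  · subst h1
    have h := pv_fill_eq 0x5A (by norm_num) width hpre
    simp only [pvReplicate] at h
    simpa using h
  by_cases h2 : i = 2
  · subst h2
    have h := pv_fill_eq 0xDE (by norm_num) width hpre
    simp only [pvReplicate] at h
    simpa using h
  by_cases h3 : i = 3
  · subst h3
    have h := pv_fill_eq 0xCA (by norm_num) width hpre
    simp only [pvReplicate] at h
    simpa using h
  have h4 : ¬ (i < 4) := by omega
  simp only [beq_iff_eq, h0, h1, h2, h3, if_false, h4]
  by_cases hv2 : i = num_vectors - 2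
  · simp [hv2]
  by_cases hv1 : i = num_vectors - 1
  · simp [hv1]
  simp only [hv2, hv1, if_false]
  exact pv_addr_eq i width
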